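-- pv_equiv track=rewrite | github.com/dense-functional-correspondence/dense_functional_correspondence | 3_pseudo_label/cogvlm_scripts/cogvlm_utils.py | remove_boxes_from_text
-- ===== SOURCE A (Python) =====
-- def remove_boxes_from_text(s, indices):
--     new_string = []
--     current_index = 0
--     new_indices = []
--     offset = 0
--
--     for start, end in indices:
--         # Add the part before the current segment to the new string
--         new_string.append(s[current_index:start-1]) # assume space before [[a,b,c,d]]
--         current_index = end
--         offset += (end - start + 1)
--         new_indices.append(end - offset)
--
--     # Add the remaining part of the string
--     new_string.append(s[current_index:])
--
--     # Join all parts to form the new string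
--     new_string = ''.join(new_string)
--
--     return new_string, new_indices
-- ===== SOURCE B (Python) =====
-- def remove_boxes_from_text(s, indices):
--     # Walk the index pairs RIGHT-TO-LEFT: each pair emits the kept slice to its
--     # right (bounded by the previously seen pair's start), the removed total is
--     # counted DOWN instead of up, and the output is assembled back-to-front.
--     total = sum(end - start + 1 for start, end in indices)
--     parts = []
--     new_indices = []
--     stop = None          # right boundary of the slice to emit (None = end of string)
--     remaining = total
--     for start, end in reversed(indices):
--         parts.append(s[end:stop])
--         new_indices.append(end - remaining)
--         remaining -= end - start + 1
--         stop = start - 1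
--     parts.append(s[0:stop])
--     return ''.join(reversed(parts)), list(reversed(new_indices))
-- ===== Notes on version B (the rewrite author's own statement) =====
-- stated objective: alternative
-- what changed: B traverses the index pairs right-to-left instead of left-to-right: each pair emits the kept slice to its RIGHT bounded by the previously visited pair's start, the removed-length counter is decremented from the precomputed total instead of accumulated upward, and both outputs are assembled back-to-front and reversed at the end.
import Mathlib
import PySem

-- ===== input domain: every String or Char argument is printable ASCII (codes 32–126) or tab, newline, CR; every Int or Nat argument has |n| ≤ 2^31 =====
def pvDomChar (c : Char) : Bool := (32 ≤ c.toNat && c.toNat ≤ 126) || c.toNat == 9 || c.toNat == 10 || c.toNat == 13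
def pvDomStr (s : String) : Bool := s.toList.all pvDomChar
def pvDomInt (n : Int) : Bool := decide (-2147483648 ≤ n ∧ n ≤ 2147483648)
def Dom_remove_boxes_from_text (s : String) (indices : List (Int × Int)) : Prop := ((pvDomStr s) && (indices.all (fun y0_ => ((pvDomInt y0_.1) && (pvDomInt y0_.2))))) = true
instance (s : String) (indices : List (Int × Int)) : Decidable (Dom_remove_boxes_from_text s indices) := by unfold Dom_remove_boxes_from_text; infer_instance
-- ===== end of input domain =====

-- B walks the index pairs right-to-left with a decreasing removed-length counter and assembles
-- both outputs back-to-front, instead of A's left-to-right loop threading current-index/offset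
-- accumulators; alternative traversal, same cost.


-- ===== PORT A =====
-- literal transliteration: one left-to-right foldl threading (new_string parts, current_index, new_indices, offset)
def remove_boxes_from_text (s : String) (indices : List (Int × Int)) : String × List Int :=
  let cs := s.toList
  let st := indices.foldl
    (fun (acc : List (List Char) × Int × List Int × Int) p =>
      let parts := acc.1
      let cur := acc.2.1
      let nidx := acc.2.2.1
      let off := acc.2.2.2
      let start := p.1
      let e := p.2
      let off' := off + (e - start + 1)
      (parts ++ [PySem.List.slice cs (some cur) (some (start - 1))], e,
       nidx ++ [e - off'], off'))
    ([], 0, [], 0)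
  let parts := st.1 ++ [PySem.List.slice cs (some st.2.1) none]
  (String.mk parts.flatten, st.2.2.1)

-- ===== PORT B =====
-- literal transliteration of Source B: right-to-left pass over the pairs, counting the removed
-- total DOWN, each pair emitting the kept slice to its right; outputs built reversed
def remove_boxes_from_text_alt (s : String) (indices : List (Int × Int)) : String × List Int :=
  let cs := s.toList
  let total := indices.foldl (fun t p => t + (p.2 - p.1 + 1)) 0   -- sum(end-start+1 …)
  let st := indices.reverse.foldl
    (fun (acc : List (List Char) × List Int × Option Int × Int) p =>
      let parts := acc.1
      let nidx := acc.2.1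
      let stop := acc.2.2.1
      let rem := acc.2.2.2
      (parts ++ [PySem.List.slice cs (some p.2) stop],
       nidx ++ [p.2 - rem], some (p.1 - 1), rem - (p.2 - p.1 + 1)))
    ([], [], none, total)
  let parts := st.1 ++ [PySem.List.slice cs (some 0) st.2.2.1]
  (String.mk parts.reverse.flatten, st.2.1.reverse)

-- ===== PRECONDITION & SPEC =====
def Spec_remove_boxes_from_text (s : String) (indices : List (Int × Int)) (out : String × List Int) : Prop := out = remove_boxes_from_text_alt s indices
instance (s : String) (indices : List (Int × Int)) (out : String × List Int) : Decidable (Spec_remove_boxes_from_text s indices out) := by unfold Spec_remove_boxes_from_text; infer_instance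

-- ===== CLAIM =====
def Claim_equal_remove_boxes_from_text : Prop := ∀ (s : String) (indices : List (Int × Int)), Dom_remove_boxes_from_text s indices → Spec_remove_boxes_from_text s indices (remove_boxes_from_text s indices)

-- ===== LEMMAS AND PROOFS =====

-- canonical list of kept slices, starting from position cur, last slice ending at `stop`
def pvPartsS (cs : List Char) (cur : Int) (stop : Option Int) : List (Int × Int) → List (List Char)
  | [] => [PySem.List.slice cs (some cur) stop]
  | (st, e) :: rest => PySem.List.slice cs (some cur) (some (st - 1)) :: pvPartsS cs e stop rest

-- canonical new-index list with running removed total t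
def pvIdx (t : Int) : List (Int × Int) → List Int
  | [] => []
  | (st, e) :: rest => (e - (t + (e - st + 1))) :: pvIdx (t + (e - st + 1)) rest

-- total removed length
def pvTot : List (Int × Int) → Int
  | [] => 0
  | (st, e) :: rest => (e - st + 1) + pvTot rest

-- canonical form of B's right-to-left fold (head of the list processed LAST)
def pvF (cs : List Char) : List (Int × Int) → Option Int → Int → List (List Char) × List Int × Option Int × Int
  | [], stop, rem => ([], [], stop, rem)
  | (st, e) :: rest, stop, rem =>
      let q := pvF cs rest stop rem
      (q.1 ++ [PySem.List.slice cs (some e) q.2.2.1], q.2.1 ++ [e - q.2.2.2],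
       some (st - 1), q.2.2.2 - (e - st + 1))

-- A's fold, followed by the final slice and the pairing, equals the canonical forms
lemma foldA_eq (cs : List Char) :
    ∀ (l : List (Int × Int)) (parts : List (List Char)) (cur : Int) (nidx : List Int) (off : Int),
    (let st := l.foldl
      (fun (acc : List (List Char) × Int × List Int × Int) p =>
        let parts := acc.1
        let cur := acc.2.1
        let nidx := acc.2.2.1
        let off := acc.2.2.2
        let start := p.1
        let e := p.2
        let off' := off + (e - start + 1)
        (parts ++ [PySem.List.slice cs (some cur) (some (start - 1))], e,
         nidx ++ [e - off'], off'))
      (parts, cur, nidx, off)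
     ((st.1 ++ [PySem.List.slice cs (some st.2.1) none]), st.2.2.1))
    = (parts ++ pvPartsS cs cur none l, nidx ++ pvIdx off l) := by
  intro l
  induction l with
  | nil => intro parts cur nidx off; simp [pvPartsS, pvIdx]
  | cons p rest ih =>
      intro parts cur nidx off
      obtain ⟨st, e⟩ := p
      simp only [List.foldl_cons]
      have := ih (parts ++ [PySem.List.slice cs (some cur) (some (st - 1))]) e
        (nidx ++ [e - (off + (e - st + 1))]) (off + (e - st + 1))
      simpa [pvPartsS, pvIdx, List.append_assoc] using this

-- B's fold over the REVERSED list equals the canonical right-to-left recursion pvF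
lemma foldB_eq (cs : List Char) :
    ∀ (l : List (Int × Int)) (P0 : List (List Char)) (N0 : List Int) (stop : Option Int) (rem : Int),
    l.reverse.foldl
      (fun (acc : List (List Char) × List Int × Option Int × Int) p =>
        let parts := acc.1
        let nidx := acc.2.1
        let stop := acc.2.2.1
        let rem := acc.2.2.2
        (parts ++ [PySem.List.slice cs (some p.2) stop],
         nidx ++ [p.2 - rem], some (p.1 - 1), rem - (p.2 - p.1 + 1)))
      (P0, N0, stop, rem)
    = (P0 ++ (pvF cs l stop rem).1, N0 ++ (pvF cs l stop rem).2.1,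
       (pvF cs l stop rem).2.2.1, (pvF cs l stop rem).2.2.2) := by
  intro l
  induction l with
  | nil => intro P0 N0 stop rem; simp [pvF]
  | cons p rest ih =>
      intro P0 N0 stop rem
      obtain ⟨st, e⟩ := p
      simp only [List.reverse_cons, List.foldl_append, List.foldl_cons, List.foldl_nil, ih]
      simp [pvF, List.append_assoc]

-- the remaining-removed counter after the fold is the initial value minus the total
lemma pvF_rem (cs : List Char) :
    ∀ (l : List (Int × Int)) (stop : Option Int) (rem : Int),
    (pvF cs l stop rem).2.2.2 = rem - pvTot l := by
  intro l
  induction l with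
  | nil => intro stop rem; simp [pvF, pvTot]
  | cons p rest ih =>
      intro stop rem
      obtain ⟨st, e⟩ := p
      simp [pvF, pvTot, ih]
      ring

-- prepending the final slice and reversing B's parts gives the canonical slice list
lemma pvF_parts (cs : List Char) :
    ∀ (l : List (Int × Int)) (c : Int) (stop : Option Int) (rem : Int),
    PySem.List.slice cs (some c) (pvF cs l stop rem).2.2.1 :: (pvF cs l stop rem).1.reverse
      = pvPartsS cs c stop l := by
  intro l
  induction l with
  | nil => intro c stop rem; simp [pvF, pvPartsS]
  | cons p rest ih =>
      intro c stop rem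
      obtain ⟨st, e⟩ := p
      simp only [pvF, List.reverse_append, List.reverse_cons, List.reverse_nil,
        List.nil_append, List.cons_append, pvPartsS]
      simp [ih e stop rem]

-- reversing B's index list gives the canonical new-index list
lemma pvF_idx (cs : List Char) :
    ∀ (l : List (Int × Int)) (stop : Option Int) (rem : Int),
    (pvF cs l stop rem).2.1.reverse = pvIdx (rem - pvTot l) l := by
  intro l
  induction l with
  | nil => intro stop rem; simp [pvF, pvIdx]
  | cons p rest ih =>
      intro stop rem
      obtain ⟨st, e⟩ := p
      simp only [pvF, List.reverse_append, List.reverse_cons, List.reverse_nil,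
        List.nil_append, List.cons_append, pvIdx, pvTot, pvF_rem, ih]
      have h : rem - (e - st + 1 + pvTot rest) + (e - st + 1) = rem - pvTot rest := by ring
      rw [h]
-- B's total sum fold equals pvTot
lemma total_eq : ∀ (l : List (Int × Int)) (t : Int),
    l.foldl (fun t p => t + (p.2 - p.1 + 1)) t = t + pvTot l := by
  intro l
  induction l with
  | nil => intro t; simp [pvTot]
  | cons p rest ih =>
      intro t
      simp only [List.foldl_cons, pvTot, ih]
      ring

-- ===== VERDICT =====
theorem remove_boxes_from_text_spec : Claim_equal_remove_boxes_from_text := by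
  intro s indices _
  unfold Spec_remove_boxes_from_text remove_boxes_from_text remove_boxes_from_text_alt
  have hA := foldA_eq s.toList indices [] 0 [] 0
  simp only [List.nil_append] at hA
  rw [Prod.ext_iff] at hA
  have hB := foldB_eq s.toList indices [] []
    none (indices.foldl (fun t p => t + (p.2 - p.1 + 1)) 0)
  simp only [total_eq, zero_add, List.nil_append] at hB
  simp only [total_eq, zero_add, hB]
  have hparts := pvF_parts s.toList indices 0 none (pvTot indices)
  have hidx := pvF_idx s.toList indices none (pvTot indices)
  simp only [sub_self] at hidx
  simp only [List.reverse_append, List.reverse_cons, List.reverse_nil, List.nil_append,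
    List.cons_append] at *
  rw [hA.1, hA.2, hparts, hidx]
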